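-- pv_equiv track=rewrite | github.com/python-la-paz/100-dias-de-python | soluciones/_100_dias/dia_92.py | sube_baja
-- ===== SOURCE A (Python) =====
-- def sube_baja(limite):
--     i = j = 1
--     k = 3
--     while limite > 0:
--         yield i
--         i = i + j
--         j = -1 if i >= k else 1 if i <= 1 else j
--         limite -= 1
-- ===== SOURCE B (Python) =====
-- def sube_baja(limite):
--     patron = (1, 2, 3, 2)
--     n = 0
--     while limite > 0:
--         yield patron[n % 4]
--         n += 1
--         limite -= 1
-- ===== Notes on version B (the rewrite author's own statement) =====
-- stated objective: simpler
-- what changed: Replaces the i/j/k increment-and-bounce state recurrence with a single counter indexing the precomputed period-4 pattern (1,2,3,2).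
import Mathlib
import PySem

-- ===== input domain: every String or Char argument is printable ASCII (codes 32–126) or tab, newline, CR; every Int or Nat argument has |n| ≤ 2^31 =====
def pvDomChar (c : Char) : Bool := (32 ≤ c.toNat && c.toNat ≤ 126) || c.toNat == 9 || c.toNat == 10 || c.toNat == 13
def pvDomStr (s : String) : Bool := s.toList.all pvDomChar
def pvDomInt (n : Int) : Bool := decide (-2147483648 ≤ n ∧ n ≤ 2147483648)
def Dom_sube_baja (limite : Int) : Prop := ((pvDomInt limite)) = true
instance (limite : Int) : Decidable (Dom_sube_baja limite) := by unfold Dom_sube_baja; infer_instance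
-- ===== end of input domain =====

-- B replaces the i/j/k bounce recurrence with a counter indexing the precomputed period-4 pattern (1,2,3,2); objective: simpler.


-- ===== PORT A =====
-- while limite > 0: yield i; i += j; j := -1 if i >= k else 1 if i <= 1 else j; limite -= 1
def subeAuxA (lim i j k : Int) : List Int :=
  if lim > 0 then
    let i' := i + j
    let j' := if i' ≥ k then -1 else if i' ≤ 1 then 1 else j
    i :: subeAuxA (lim - 1) i' j' k
  else []
termination_by lim.toNat
decreasing_by omega

def sube_baja (limite : Int) : List Int := subeAuxA limite 1 1 3

-- ===== PORT B =====
-- patron[n % 4]: index always in range (0 ≤ n % 4 < 4), so .getD 0 never fires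
def subeAuxB (lim n : Int) : List Int :=
  if lim > 0 then
    (PySem.List.pyGet? ([1, 2, 3, 2] : List Int) (PySem.Int.mod n 4)).getD 0
      :: subeAuxB (lim - 1) (n + 1)
  else []
termination_by lim.toNat
decreasing_by omega

def sube_baja_alt (limite : Int) : List Int := subeAuxB limite 0

-- ===== PRECONDITION & SPEC =====
def Spec_sube_baja (limite : Int) (out : List Int) : Prop := out = sube_baja_alt limite
instance (limite : Int) (out : List Int) : Decidable (Spec_sube_baja limite out) := by unfold Spec_sube_baja; infer_instance

-- ===== CLAIM (what is proved, stated in full; the proofs are below) =====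
def Claim_equal_sube_baja : Prop := ∀ (limite : Int), Dom_sube_baja limite → Spec_sube_baja limite (sube_baja limite)

-- ===== LEMMAS AND PROOFS =====
theorem subeAux_key : ∀ (m : Nat) (lim n : Int), lim.toNat = m → 0 ≤ n →
    (n % 4 = 0 → subeAuxA lim 1 1 3 = subeAuxB lim n) ∧
    (n % 4 = 1 → subeAuxA lim 2 1 3 = subeAuxB lim n) ∧
    (n % 4 = 2 → subeAuxA lim 3 (-1) 3 = subeAuxB lim n) ∧
    (n % 4 = 3 → subeAuxA lim 2 (-1) 3 = subeAuxB lim n) := by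
  intro m
  induction m with
  | zero =>
    intro lim n hm _
    have hle : ¬ lim > 0 := by omega
    refine ⟨?_, ?_, ?_, ?_⟩ <;> intro _ <;> rw [subeAuxA, subeAuxB, if_neg hle, if_neg hle]
  | succ m ih =>
    intro lim n hm hn
    by_cases hpos : lim > 0
    · have ih' := ih (lim - 1) (n + 1) (by omega) (by omega)
      have hmod : PySem.Int.mod n 4 = n % 4 := by
        simp [PySem.Int.mod, Int.fmod_eq_emod_of_nonneg _ (by omega : (0:Int) ≤ 4)]
      refine ⟨?_, ?_, ?_, ?_⟩ <;> intro h <;>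
        rw [subeAuxA, subeAuxB, if_pos hpos, if_pos hpos] <;>
        simp only [hmod, h] <;> norm_num
      · exact ih'.2.1 (by omega)
      · exact ih'.2.2.1 (by omega)
      · exact ⟨by decide, ih'.2.2.2 (by omega)⟩
      · exact ⟨by decide, ih'.1 (by omega)⟩
    · refine ⟨?_, ?_, ?_, ?_⟩ <;> intro _ <;> rw [subeAuxA, subeAuxB, if_neg hpos, if_neg hpos]

-- ===== VERDICT (by name: the statement is the Claim_ definition above) =====
theorem sube_baja_spec : Claim_equal_sube_baja := by
  intro limite _
  unfold Spec_sube_baja sube_baja sube_baja_alt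
  exact (subeAux_key limite.toNat limite 0 rfl (by omega)).1 (by decide)
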